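-- pv_equiv track=rewrite | github.com/JMCJDog/jrocks-personal-ai | pre_commit_optimizer.py | filter_diff
-- ===== SOURCE A (Python) =====
-- _NOISE_SUFFIXES = (
--     ".lock", "-lock.json", ".min.js", ".min.css",
--     ".map", ".svg", ".png", ".jpg", ".jpeg", ".gif",
-- )
--
-- def filter_diff(diff: str, files: list[str]) -> str:
--     """Strip hunks for noise files (lock files, minified assets) to save tokens."""
--     if not diff:
--         return diff
--     noise_files = {f for f in files if any(f.endswith(s) for s in _NOISE_SUFFIXES)}
--     if not noise_files:
--         return diff
--     lines = []
--     skip = False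
--     for line in diff.splitlines(keepends=True):
--         if line.startswith("diff --git "):
--             skip = any(nf in line for nf in noise_files)
--         if not skip:
--             lines.append(line)
--     return "".join(lines)
-- ===== SOURCE B (Python) =====
-- _NOISE_SUFFIXES = (
--     ".lock", "-lock.json", ".min.js", ".min.css",
--     ".map", ".svg", ".png", ".jpg", ".jpeg", ".gif",
-- )
--
--
-- def _is_header(line):
--     return line.startswith("diff --git ")
--
--
-- def _group_sections(lines):
--     """Group header-led lines into sections; each section starts at a header line.
--
--     Precondition: lines is empty or starts with a header line."""
--     sections = []
--     for line in lines:
--         if _is_header(line):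
--             sections.append([line])
--         else:
--             sections[-1].append(line)
--     return sections
--
--
-- def filter_diff(diff: str, files: list[str]) -> str:
--     """Strip hunks for noise files (lock files, minified assets) to save tokens."""
--     if not diff:
--         return diff
--     noise_files = {f for f in files if any(f.endswith(s) for s in _NOISE_SUFFIXES)}
--     if not noise_files:
--         return diff
--     lines = diff.splitlines(keepends=True)
--     n_pre = 0
--     while n_pre < len(lines) and not _is_header(lines[n_pre]):
--         n_pre += 1
--     kept = lines[:n_pre]
--     for sec in _group_sections(lines[n_pre:]):
--         if not any(nf in sec[0] for nf in noise_files):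
--             kept.extend(sec)
--     return "".join(kept)
-- ===== Notes on version B (the rewrite author's own statement) =====
-- stated objective: alternative
-- what changed: Replaces A's single pass with a carried skip-flag by splitting the keepends lines into a preamble plus header-led sections, filtering whole sections by their header line, and rejoining.
import Mathlib
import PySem

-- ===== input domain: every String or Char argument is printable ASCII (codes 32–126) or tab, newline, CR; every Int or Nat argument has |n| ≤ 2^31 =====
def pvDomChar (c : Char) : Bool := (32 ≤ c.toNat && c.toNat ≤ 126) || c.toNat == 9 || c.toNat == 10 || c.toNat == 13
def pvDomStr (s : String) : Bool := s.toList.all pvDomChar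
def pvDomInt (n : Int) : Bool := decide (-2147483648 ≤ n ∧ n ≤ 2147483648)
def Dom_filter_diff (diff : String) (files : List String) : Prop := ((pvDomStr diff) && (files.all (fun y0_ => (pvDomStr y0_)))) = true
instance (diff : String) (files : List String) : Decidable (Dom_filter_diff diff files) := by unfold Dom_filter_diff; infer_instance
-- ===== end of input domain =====

-- B restructures A's one-pass skip-flag loop as split-into-sections-then-filter (objective: alternative decomposition, same cost).

-- shared helpers: both Pythons call diff.splitlines(keepends=True); exact on Dom
-- (line boundaries \n, \r\n, \r only — Dom admits no \x0b/\x0c/… characters)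
def pvSplitKeep : List Char → List Char → List (List Char)
  | [], acc => if acc = [] then [] else [acc.reverse]
  | c :: r, acc =>
    if c = '\n' then (acc.reverse ++ ['\n']) :: pvSplitKeep r []
    else if c = '\r' then
      if r.head? = some '\n' then (acc.reverse ++ ['\r', '\n']) :: pvSplitKeep r.tail []
      else (acc.reverse ++ ['\r']) :: pvSplitKeep r []
    else pvSplitKeep r (c :: acc)
  termination_by cs _ => cs.length
  decreasing_by all_goals (simp [List.length_tail]; try omega)

def pvNoiseSuffixes : List String :=
  [".lock", "-lock.json", ".min.js", ".min.css", ".map", ".svg", ".png", ".jpg", ".jpeg", ".gif"]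

-- line.startswith("diff --git ")
def pvIsHeader (l : List Char) : Bool := PySem.Chars.startswith l ("diff --git ".toList)

-- {f for f in files if any(f.endswith(s) for s in _NOISE_SUFFIXES)}
def pvNoise (files : List String) : List String :=
  PySem.Set.ofList (files.filter (fun f => pvNoiseSuffixes.any (fun s => PySem.Str.endswith f s)))

-- ===== PORT A =====
-- A's loop: 'lines' accumulator and 'skip' flag, one line at a time
def pvLoopA (noise : List String) : List (List Char) → List (List Char) → Bool → List (List Char)
  | [], acc, _ => acc
  | l :: rest, acc, skip =>
    let skip' := if pvIsHeader l then noise.any (fun nf => PySem.Chars.isIn nf.toList l) else skip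
    pvLoopA noise rest (if skip' then acc else acc ++ [l]) skip'

def filter_diff (diff : String) (files : List String) : String :=
  if diff.toList = [] then diff
  else if pvNoise files = [] then diff
  else String.ofList (pvLoopA (pvNoise files) (pvSplitKeep diff.toList []) [] false).flatten  -- "".join

-- ===== PORT B =====
-- group header-led lines into sections, each starting at a header line
def pvGroupSecs : List (List Char) → List (List (List Char))
  | [] => []
  | l :: rest =>
    (l :: rest.takeWhile (fun x => !pvIsHeader x)) :: pvGroupSecs (rest.dropWhile (fun x => !pvIsHeader x))
  termination_by ls => ls.length
  decreasing_by simpa using Nat.lt_succ_of_le (List.length_dropWhile_le _ _)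

def filter_diff_alt (diff : String) (files : List String) : String :=
  if diff.toList = [] then diff
  else if pvNoise files = [] then diff
  else
    String.ofList
      ((pvSplitKeep diff.toList []).takeWhile (fun l => !pvIsHeader l) ++
        ((pvGroupSecs ((pvSplitKeep diff.toList []).dropWhile (fun l => !pvIsHeader l))).filter
          (fun sec => !((pvNoise files).any (fun nf => PySem.Chars.isIn nf.toList (sec.headD []))))).flatten).flatten  -- "".join

-- ===== PRECONDITION & SPEC =====
def Spec_filter_diff (diff : String) (files : List String) (out : String) : Prop := out = filter_diff_alt diff files
instance (diff : String) (files : List String) (out : String) : Decidable (Spec_filter_diff diff files out) := by unfold Spec_filter_diff; infer_instance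

-- ===== CLAIM (what is proved, stated in full; the proofs are below) =====
def Claim_equal_filter_diff : Prop := ∀ (diff : String) (files : List String), Dom_filter_diff diff files → Spec_filter_diff diff files (filter_diff diff files)

-- ===== LEMMAS AND PROOFS =====

-- A's kept lines, accumulator removed
def pvKeep (noise : List String) : List (List Char) → Bool → List (List Char)
  | [], _ => []
  | l :: rest, skip =>
    let skip' := if pvIsHeader l then noise.any (fun nf => PySem.Chars.isIn nf.toList l) else skip
    (if skip' then [] else [l]) ++ pvKeep noise rest skip'

lemma pvLoopA_eq_keep (noise : List String) (ls : List (List Char)) (acc : List (List Char)) (skip : Bool) :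
    pvLoopA noise ls acc skip = acc ++ pvKeep noise ls skip := by
  induction ls generalizing acc skip with
  | nil => simp [pvLoopA, pvKeep]
  | cons l rest ih =>
    simp only [pvLoopA, pvKeep]
    split <;> rw [ih] <;> split <;> simp_all

lemma pvKeep_nonheader_prefix (noise : List String) (t1 t2 : List (List Char)) (s : Bool)
    (h : ∀ l ∈ t1, pvIsHeader l = false) :
    pvKeep noise (t1 ++ t2) s = (if s then [] else t1) ++ pvKeep noise t2 s := by
  induction t1 with
  | nil => simp
  | cons l t ih =>
    have hl : pvIsHeader l = false := h l (List.mem_cons_self)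
    simp only [List.cons_append, pvKeep, hl, Bool.false_eq_true, if_false]
    rw [ih (fun x hx => h x (List.mem_cons_of_mem _ hx))]
    cases s <;> simp

lemma pvKeep_sections (noise : List String) (ls : List (List Char))
    (hh : ls = [] ∨ pvIsHeader (ls.headD []) = true) : ∀ (s : Bool),
    pvKeep noise ls s =
      ((pvGroupSecs ls).filter
        (fun sec => !(noise.any (fun nf => PySem.Chars.isIn nf.toList (sec.headD []))))).flatten := by
  induction ls using pvGroupSecs.induct with
  | case1 => intro s; simp [pvKeep, pvGroupSecs]
  | case2 l rest ih =>
    intro s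
    have hl : pvIsHeader l = true := by
      rcases hh with h | h
      · exact absurd h (by simp)
      · simpa using h
    have hrest := List.takeWhile_append_dropWhile (p := fun x => !pvIsHeader x) (l := rest)
    have ht1 : ∀ x ∈ rest.takeWhile (fun x => !pvIsHeader x), pvIsHeader x = false := by
      intro x hx
      have := List.mem_takeWhile_imp hx
      simpa using this
    have ht2 : rest.dropWhile (fun x => !pvIsHeader x) = [] ∨
        pvIsHeader ((rest.dropWhile (fun x => !pvIsHeader x)).headD []) = true := by
      cases hd : rest.dropWhile (fun x => !pvIsHeader x) with
      | nil => exact Or.inl rfl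
      | cons y ys =>
        right
        have := List.head_dropWhile_not (p := fun x => !pvIsHeader x) (l := rest)
          (by simp [hd])
        simp only [hd] at this ⊢
        simpa using this
    simp only [pvKeep, hl, if_true]
    conv_lhs => rw [← hrest]
    rw [pvKeep_nonheader_prefix noise _ _ _ ht1, ih ht2]
    rw [pvGroupSecs]
    simp only [List.filter_cons, List.headD_cons]
    by_cases hn : (noise.any fun nf => PySem.Chars.isIn nf.toList l) = true
    · simp [hn]
    · rw [Bool.not_eq_true] at hn
      simp [hn]

theorem filter_diff_eq_alt (diff : String) (files : List String) :
    filter_diff diff files = filter_diff_alt diff files := by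
  unfold filter_diff filter_diff_alt
  split
  · rfl
  · split
    · rfl
    · congr 1
      rw [pvLoopA_eq_keep]
      simp only [List.nil_append]
      have hsplit := List.takeWhile_append_dropWhile
        (p := fun l => !pvIsHeader l) (l := pvSplitKeep diff.toList [])
      conv_lhs => rw [← hsplit]
      rw [pvKeep_nonheader_prefix _ _ _ _ (by
        intro x hx
        have := List.mem_takeWhile_imp hx
        simpa using this)]
      rw [pvKeep_sections _ _ (by
        cases hd : (pvSplitKeep diff.toList []).dropWhile (fun l => !pvIsHeader l) with
        | nil => exact Or.inl rfl
        | cons y ys =>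
          right
          have := List.head_dropWhile_not (p := fun l => !pvIsHeader l)
            (l := pvSplitKeep diff.toList []) (by simp [hd])
          simp only [hd] at this ⊢
          simpa using this)]
      simp

-- ===== VERDICT (by name: the statement is the Claim_ definition above) =====
theorem filter_diff_spec : Claim_equal_filter_diff := by
  intro diff files _
  unfold Spec_filter_diff
  exact filter_diff_eq_alt diff files
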